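-- pv_equiv track=rewrite | github.com/kohrongying/coding-night | session-2/main.py | get_weighted_sum
-- ===== SOURCE A (Python) =====
-- BAD_WORDS = {
--     'unreadable': 1,
--     'messy': 1,
--     'badcode': 2,
--     'lone': 2
-- }
--
-- GOOD_WORDS = {
--     'tdd': 1,
--     'pairing': 1,
--     'agile': 1,
-- }
--
-- def find_subsequence_count(s, seq):
--     if len(seq) == 0: return 0
--     original_seq = seq
--     count = 0
--     while len(s) > 0:
--         if s[0] == seq[0]:
--             seq = seq[1:]
--         if len(seq) == 0:
--             count += 1
--             seq = original_seq
--         s = s[1:]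
--     return count
--
-- def get_weighted_sum(s, good_words_flag=False):
--     weight = 0
--     for word in BAD_WORDS:
--         count = find_subsequence_count(s, word)
--         weight += BAD_WORDS[word] * count
--     if good_words_flag:
--         for word in GOOD_WORDS:
--             count = find_subsequence_count(s, word)
--             weight -= GOOD_WORDS[word] * count
--     return weight
-- ===== SOURCE B (Python) =====
-- BAD_WORDS = {
--     'unreadable': 1,
--     'messy': 1,
--     'badcode': 2,
--     'lone': 2
-- }
--
-- GOOD_WORDS = {
--     'tdd': 1,
--     'pairing': 1,
--     'agile': 1,
-- }
--
-- def get_weighted_sum(s, good_words_flag=False):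
--     # one pass over s, running all word matchers simultaneously
--     matchers = [[w, wt, 0, 0] for w, wt in BAD_WORDS.items()]
--     if good_words_flag:
--         matchers += [[w, -wt, 0, 0] for w, wt in GOOD_WORDS.items()]
--     for ch in s:
--         for m in matchers:
--             w = m[0]
--             if ch == w[m[2]]:
--                 m[2] += 1
--                 if m[2] == len(w):
--                     m[3] += 1
--                     m[2] = 0
--     return sum(wt * cnt for _, wt, _, cnt in matchers)
-- ===== Notes on version B (the rewrite author's own statement) =====
-- stated objective: faster
-- what changed: Replaced seven independent scans of s (one per word via find_subsequence_count, each rebuilding s by slicing) with a single index-based pass over s that advances all word matchers simultaneously, each keeping a (index, completed-count) state, summing signed weights at the end.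
import Mathlib
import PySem

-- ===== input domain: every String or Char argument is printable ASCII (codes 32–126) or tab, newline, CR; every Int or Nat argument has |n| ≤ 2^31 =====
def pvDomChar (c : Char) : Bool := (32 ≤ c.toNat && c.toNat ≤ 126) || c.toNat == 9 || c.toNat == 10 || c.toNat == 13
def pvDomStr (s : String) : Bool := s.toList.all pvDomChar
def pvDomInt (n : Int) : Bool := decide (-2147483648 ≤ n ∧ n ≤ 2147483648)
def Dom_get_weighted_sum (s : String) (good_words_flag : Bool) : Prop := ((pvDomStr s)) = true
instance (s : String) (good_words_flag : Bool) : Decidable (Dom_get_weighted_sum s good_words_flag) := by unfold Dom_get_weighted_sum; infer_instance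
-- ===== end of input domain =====

-- B makes one pass over s running all word matchers simultaneously instead of A's
-- per-word rescans of s (faster: A re-slices s per step, B indexes once through it).

-- ===== PORT A =====
-- the while-loop of find_subsequence_count: s, seq, count are the loop state
def pvFscLoop (orig : List Char) : List Char → List Char → Int → Int
  | [], _, count => count
  | c :: rest, sq, count =>
    let sq1 := if sq.head? = some c then sq.drop 1 else sq
    if sq1.isEmpty then pvFscLoop orig rest orig (count + 1)
    else pvFscLoop orig rest sq1 count

def find_subsequence_count (s : String) (seq : String) : Int :=
  if seq.toList.length = 0 then 0
  else pvFscLoop seq.toList s.toList seq.toList 0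

def pvBAD : List (String × Int) := [("unreadable", 1), ("messy", 1), ("badcode", 2), ("lone", 2)]
def pvGOOD : List (String × Int) := [("tdd", 1), ("pairing", 1), ("agile", 1)]

def get_weighted_sum (s : String) (good_words_flag : Bool) : Int :=
  let weight := pvBAD.foldl (fun w p => w + p.2 * find_subsequence_count s p.1) 0
  if good_words_flag then
    pvGOOD.foldl (fun w p => w - p.2 * find_subsequence_count s p.1) weight
  else weight

-- ===== PORT B =====
-- one matcher = (word, signed weight, current index, completed count)
def pvStep (c : Char) : List Char × Int × Nat × Int → List Char × Int × Nat × Int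
  | (w, wt, i, cnt) =>
    if w[i]? = some c then
      if i + 1 = w.length then (w, wt, 0, cnt + 1) else (w, wt, i + 1, cnt)
    else (w, wt, i, cnt)

def get_weighted_sum_alt (s : String) (good_words_flag : Bool) : Int :=
  let init : List (List Char × Int × Nat × Int) :=
    [("unreadable".toList, 1, 0, 0), ("messy".toList, 1, 0, 0),
     ("badcode".toList, 2, 0, 0), ("lone".toList, 2, 0, 0)] ++
    (if good_words_flag then
      [("tdd".toList, -1, 0, 0), ("pairing".toList, -1, 0, 0), ("agile".toList, -1, 0, 0)]
     else [])
  let final := s.toList.foldl (fun st c => st.map (pvStep c)) init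
  final.foldl (fun acc m => acc + m.2.1 * m.2.2.2) 0

-- ===== PRECONDITION & SPEC =====
def Spec_get_weighted_sum (s : String) (good_words_flag : Bool) (out : Int) : Prop := out = get_weighted_sum_alt s good_words_flag
instance (s : String) (good_words_flag : Bool) (out : Int) : Decidable (Spec_get_weighted_sum s good_words_flag out) := by unfold Spec_get_weighted_sum; infer_instance

-- ===== CLAIM (what is proved, stated in full; the proofs are below) =====
def Claim_equal_get_weighted_sum : Prop := ∀ (s : String) (good_words_flag : Bool), Dom_get_weighted_sum s good_words_flag → Spec_get_weighted_sum s good_words_flag (get_weighted_sum s good_words_flag)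

-- ===== LEMMAS AND PROOFS =====

-- running the simultaneous scan is running each matcher independently
theorem pv_fold_map (chars : List Char) (init : List (List Char × Int × Nat × Int)) :
    chars.foldl (fun st c => st.map (pvStep c)) init
      = init.map (fun e => chars.foldl (fun e c => pvStep c e) e) := by
  induction chars generalizing init with
  | nil => simp
  | cons c rest ih =>
    simp only [List.foldl_cons, ih, List.map_map]
    rfl

-- a matcher's word and weight are never changed by the scan
theorem pv_fold_shape (chars : List Char) (w : List Char) (wt : Int) (i : Nat) (cnt : Int) :
    ∃ i' cnt', chars.foldl (fun e c => pvStep c e) (w, wt, i, cnt) = (w, wt, i', cnt') := by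
  induction chars generalizing i cnt with
  | nil => exact ⟨i, cnt, rfl⟩
  | cons c rest ih =>
    simp only [List.foldl_cons, pvStep]
    split
    · split
      · exact ih 0 (cnt + 1)
      · exact ih (i + 1) cnt
    · exact ih i cnt

-- the single-matcher fold computes A's greedy subsequence count
theorem pv_per_word (chars : List Char) (w : List Char) (wt : Int) (i : Nat) (cnt : Int)
    (h : i < w.length) :
    pvFscLoop w chars (w.drop i) cnt
      = (chars.foldl (fun e c => pvStep c e) (w, wt, i, cnt)).2.2.2 := by
  induction chars generalizing i cnt with
  | nil => rfl
  | cons c rest ih =>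
    simp only [pvFscLoop, List.foldl_cons, pvStep, List.head?_drop, List.drop_drop]
    by_cases hm : w[i]? = some c
    · rw [if_pos hm, if_pos hm]
      by_cases he : i + 1 = w.length
      · have hnil : List.drop (i + 1) w = [] := List.drop_eq_nil_iff.mpr (by omega)
        rw [if_pos he, if_pos (show (List.drop (i + 1) w).isEmpty = true by simp [hnil])]
        have := ih 0 (cnt + 1) (by omega)
        simpa using this
      · rw [if_neg he, if_neg (show ¬ ((List.drop (i + 1) w).isEmpty = true) by
          simp only [List.isEmpty_iff, List.drop_eq_nil_iff]; omega)]
        exact ih (i + 1) cnt (by omega)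
    · rw [if_neg hm, if_neg hm, if_neg (show ¬ ((List.drop i w).isEmpty = true) by
        simp only [List.isEmpty_iff, List.drop_eq_nil_iff]; omega)]
      exact ih i cnt h

-- A's count for a nonempty word equals the matcher's final count
theorem pv_count_eq (s seq : String) (wt : Int) (h : 0 < seq.toList.length) :
    find_subsequence_count s seq
      = (s.toList.foldl (fun e c => pvStep c e) (seq.toList, wt, 0, 0)).2.2.2 := by
  rw [find_subsequence_count, if_neg (by omega)]
  have := pv_per_word s.toList seq.toList wt 0 0 h
  simpa using this

-- ===== VERDICT (by name: the statement is the Claim_ definition above) =====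
theorem get_weighted_sum_spec : Claim_equal_get_weighted_sum := by
  intro s flag _
  simp only [Spec_get_weighted_sum, get_weighted_sum, get_weighted_sum_alt]
  rw [pv_fold_map]
  obtain ⟨i1, c1, h1⟩ := pv_fold_shape s.toList "unreadable".toList 1 0 0
  obtain ⟨i2, c2, h2⟩ := pv_fold_shape s.toList "messy".toList 1 0 0
  obtain ⟨i3, c3, h3⟩ := pv_fold_shape s.toList "badcode".toList 2 0 0
  obtain ⟨i4, c4, h4⟩ := pv_fold_shape s.toList "lone".toList 2 0 0
  obtain ⟨i5, c5, h5⟩ := pv_fold_shape s.toList "tdd".toList (-1) 0 0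
  obtain ⟨i6, c6, h6⟩ := pv_fold_shape s.toList "pairing".toList (-1) 0 0
  obtain ⟨i7, c7, h7⟩ := pv_fold_shape s.toList "agile".toList (-1) 0 0
  have e1 : find_subsequence_count s "unreadable" = c1 := by
    rw [pv_count_eq s "unreadable" 1 (by decide), h1]
  have e2 : find_subsequence_count s "messy" = c2 := by
    rw [pv_count_eq s "messy" 1 (by decide), h2]
  have e3 : find_subsequence_count s "badcode" = c3 := by
    rw [pv_count_eq s "badcode" 2 (by decide), h3]
  have e4 : find_subsequence_count s "lone" = c4 := by
    rw [pv_count_eq s "lone" 2 (by decide), h4]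
  have e5 : find_subsequence_count s "tdd" = c5 := by
    rw [pv_count_eq s "tdd" (-1) (by decide), h5]
  have e6 : find_subsequence_count s "pairing" = c6 := by
    rw [pv_count_eq s "pairing" (-1) (by decide), h6]
  have e7 : find_subsequence_count s "agile" = c7 := by
    rw [pv_count_eq s "agile" (-1) (by decide), h7]
  cases flag <;>
    simp only [pvBAD, pvGOOD, if_true, if_false, Bool.false_eq_true, List.append_nil,
      List.foldl_cons, List.foldl_nil, List.map_cons, List.map_nil, List.map_append,
      List.cons_append, List.nil_append, h1, h2, h3, h4, h5, h6, h7,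
      e1, e2, e3, e4, e5, e6, e7] <;>
    ring
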